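-- pv_equiv track=rewrite | github.com/wmin401/Programmers-Algorithm | 프로그래머스/1/135808. 과일 장수/과일 장수.py | solution
-- ===== SOURCE A (Python) =====
-- def solution(k, m, score):
--
--     sorted_score =  sorted(score)
--     result = 0
--     for i in range(len(sorted_score)//m):
--         box = []
--         for j in range(m):
--             box.append(sorted_score.pop())
--         result += min(box) * m
--
--
--
--
--     return result
-- ===== SOURCE B (Python) =====
-- def solution(k, m, score):
--     s = sorted(score)
--     total = 0
--     for i in range(len(s) - m, -1, -m):
--         total += s[i]
--     return total * m
-- ===== Notes on version B (the rewrite author's own statement) =====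
-- stated objective: faster
-- what changed: Instead of repeatedly popping m elements into a box and taking min(box), B sorts once and directly sums every m-th element from the top (indices len-m, len-2m, ... in the ascending sort), multiplying the sum by m at the end.
import Mathlib
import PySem

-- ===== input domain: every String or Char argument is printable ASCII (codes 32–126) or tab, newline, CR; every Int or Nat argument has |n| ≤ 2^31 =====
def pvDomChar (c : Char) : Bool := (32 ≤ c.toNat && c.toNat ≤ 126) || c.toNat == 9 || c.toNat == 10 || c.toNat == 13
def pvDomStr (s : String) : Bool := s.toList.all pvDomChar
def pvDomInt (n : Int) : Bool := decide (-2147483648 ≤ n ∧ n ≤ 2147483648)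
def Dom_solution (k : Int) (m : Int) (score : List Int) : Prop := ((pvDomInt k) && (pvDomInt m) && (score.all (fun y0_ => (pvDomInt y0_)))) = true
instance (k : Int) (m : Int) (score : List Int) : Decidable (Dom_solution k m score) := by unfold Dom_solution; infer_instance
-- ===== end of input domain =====

-- B replaces A's pop-m-into-a-box-then-min loop by summing every m-th element from the top of one ascending sort; objective: simpler.

-- ===== PORT A =====
-- state of the outer loop: (sorted_score, result); state of the inner loop: (box, sorted_score)
def solution (k : Int) (m : Int) (score : List Int) : Int :=
  let sorted_score := PySem.List.sorted score (fun x => x)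
  let st := (PySem.List.pyRange 0 (PySem.Int.floordiv (sorted_score.length : Int) m) 1).foldl
    (fun (st : List Int × Int) _ =>
      let bs := (PySem.List.pyRange 0 m 1).foldl
        (fun (bs : List Int × List Int) _ =>
          match PySem.List.pop? bs.2 with
          | some (x, rest) => (bs.1 ++ [x], rest)
          | none => bs)
        ([], st.1)
      (bs.2, st.2 + ((PySem.List.min? bs.1 (fun x => x)).getD 0) * m))
    (sorted_score, 0)
  st.2

-- ===== PORT B =====
def solution_alt (k : Int) (m : Int) (score : List Int) : Int :=
  let s := PySem.List.sorted score (fun x => x)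
  let total := (PySem.List.pyRange ((s.length : Int) - m) (-1) (-m)).foldl
    (fun t i => t + PySem.List.pyGetD s i 0) 0
  total * m

-- ===== PRECONDITION & SPEC =====
-- Pre_ excludes exactly m = 0, where Python A raises ZeroDivisionError (len//m) and B raises ValueError (range step 0).
def Pre_solution (k : Int) (m : Int) (score : List Int) : Prop := m ≠ 0
instance (k : Int) (m : Int) (score : List Int) : Decidable (Pre_solution k m score) := by unfold Pre_solution; infer_instance
def pvWitness_solution : Int × Int × List Int := (5, 2, [4, 1, 2, 3])
def Spec_solution (k : Int) (m : Int) (score : List Int) (out : Int) : Prop := out = solution_alt k m score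
instance (k : Int) (m : Int) (score : List Int) (out : Int) : Decidable (Spec_solution k m score out) := by unfold Spec_solution; infer_instance

-- ===== CLAIM (what is proved, stated in full; the proofs are below) =====
def Claim_equal_solution : Prop := ∀ (k : Int) (m : Int) (score : List Int), Dom_solution k m score → Pre_solution k m score → Spec_solution k m score (solution k m score)

-- ===== LEMMAS AND PROOFS =====

-- the pop-one-element step of A's inner loop
def pvStepI (bs : List Int × List Int) : List Int × List Int :=
  match PySem.List.pop? bs.2 with
  | some (x, rest) => (bs.1 ++ [x], rest)
  | none => bs

-- the whole body of A's outer loop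
def pvStepO (m : Int) (st : List Int × Int) : List Int × Int :=
  let bs := (PySem.List.pyRange 0 m 1).foldl
    (fun (bs : List Int × List Int) _ =>
      match PySem.List.pop? bs.2 with
      | some (x, rest) => (bs.1 ++ [x], rest)
      | none => bs)
    ([], st.1)
  (bs.2, st.2 + ((PySem.List.min? bs.1 (fun x => x)).getD 0) * m)

theorem pv_foldl_ignore {α β : Type} (f : α → α) :
    ∀ (l : List β) (init : α), l.foldl (fun a _ => f a) init = f^[l.length] init := by
  intro l
  induction l with
  | nil => intro init; simp
  | cons b t ih => intro init; simp [List.foldl_cons, Function.iterate_succ_apply, ih]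

theorem pv_inner (m' : Nat) :
    ∀ (box pre suf : List Int), suf.length = m' →
      pvStepI^[m'] (box, pre ++ suf) = (box ++ suf.reverse, pre) := by
  induction m' with
  | zero =>
    intro box pre suf h
    simp [List.eq_nil_of_length_eq_zero h]
  | succ n ih =>
    intro box pre suf h
    rcases suf.eq_nil_or_concat with rfl | ⟨ys, y, rfl⟩
    · simp at h
    · simp only [List.concat_eq_append] at h ⊢
      have hlen : ys.length = n := by simpa using h
      rw [Function.iterate_succ_apply]
      have hstep : pvStepI (box, pre ++ (ys ++ [y])) = (box ++ [y], pre ++ ys) := by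
        simp [pvStepI, ← List.append_assoc, PySem.List.pop?_last]
      rw [hstep, ih (box ++ [y]) pre ys hlen]
      simp

theorem pv_min_cons_cons (a b : Int) (t : List Int) :
    PySem.List.min? (a :: b :: t) (fun x => x)
      = PySem.List.min? ((if b < a then b else a) :: t) (fun x => x) := by
  by_cases h : b < a <;> simp [PySem.List.min?, List.foldl_cons, h]

theorem pv_min_getLast? :
    ∀ (t : List Int) (a : Int), (a :: t).Pairwise (fun x y => y ≤ x) →
      PySem.List.min? (a :: t) (fun x => x) = (a :: t).getLast? := by
  intro t
  induction t with
  | nil => intro a _; simp [PySem.List.min?]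
  | cons b t ih =>
    intro a hp
    have hba : b ≤ a := (List.pairwise_cons.1 hp).1 b (by simp)
    have hp' : (b :: t).Pairwise (fun x y => y ≤ x) := (List.pairwise_cons.1 hp).2
    have hc : (if b < a then b else a) = b := by
      split_ifs with h
      · rfl
      · omega
    rw [pv_min_cons_cons, hc, ih b hp', List.getLast?_cons_cons]

theorem pv_stepO (m : Int) (hm : 1 ≤ m) (s : List Int) (r : Int)
    (hs : s.Pairwise (· ≤ ·)) (hlen : m.toNat ≤ s.length) :
    pvStepO m (s, r) = (s.take (s.length - m.toNat),
      r + (s.getD (s.length - m.toNat) 0) * m) := by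
  have hdlen : (s.drop (s.length - m.toNat)).length = m.toNat := by
    simp; omega
  have hrange : (PySem.List.pyRange 0 m 1).length = m.toNat := by
    rw [PySem.List.length_pyRange_one]; simp
  have hinner : (PySem.List.pyRange 0 m 1).foldl
      (fun (bs : List Int × List Int) _ =>
        match PySem.List.pop? bs.2 with
        | some (x, rest) => (bs.1 ++ [x], rest)
        | none => bs)
      ([], s) = ((s.drop (s.length - m.toNat)).reverse, s.take (s.length - m.toNat)) := by
    have h1 := pv_foldl_ignore pvStepI (PySem.List.pyRange 0 m 1) (([] : List Int), s)
    have h2 := pv_inner m.toNat ([] : List Int) (s.take (s.length - m.toNat))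
      (s.drop (s.length - m.toNat)) hdlen
    rw [List.take_append_drop] at h2
    calc (PySem.List.pyRange 0 m 1).foldl
          (fun (bs : List Int × List Int) _ =>
            match PySem.List.pop? bs.2 with
            | some (x, rest) => (bs.1 ++ [x], rest)
            | none => bs)
          ([], s)
        = pvStepI^[(PySem.List.pyRange 0 m 1).length] ([], s) := h1
      _ = pvStepI^[m.toNat] ([], s) := by rw [hrange]
      _ = ([] ++ (s.drop (s.length - m.toNat)).reverse, s.take (s.length - m.toNat)) := h2
      _ = ((s.drop (s.length - m.toNat)).reverse, s.take (s.length - m.toNat)) := by simp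
  have hmin : PySem.List.min? ((s.drop (s.length - m.toNat)).reverse) (fun x => x)
      = (s.drop (s.length - m.toNat)).head? := by
    rcases hrev : (s.drop (s.length - m.toNat)).reverse with _ | ⟨a, t⟩
    · have : s.drop (s.length - m.toNat) = [] := by
        simpa using congrArg List.reverse hrev
      rw [this]
      simp [PySem.List.min?]
    · have hpw : (a :: t).Pairwise (fun x y => y ≤ x) := by
        rw [← hrev, List.pairwise_reverse]
        exact hs.drop
      rw [pv_min_getLast?, ← hrev]
      · simp
      · exact hpw
  have hhead : (s.drop (s.length - m.toNat)).head? = some (s.getD (s.length - m.toNat) 0) := by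
    rw [List.head?_drop]
    have hlt : s.length - m.toNat < s.length := by omega
    simp [List.getD_eq_getElem?_getD, List.getElem?_eq_getElem hlt]
  simp only [pvStepO, hinner, hmin, hhead, Option.getD_some]

theorem pv_iterO (m : Int) (hm : 1 ≤ m) :
    ∀ (q : Nat) (s : List Int) (r : Int), s.Pairwise (· ≤ ·) → q * m.toNat ≤ s.length →
      ((pvStepO m)^[q] (s, r)).2 =
        r + (((List.range q).map (fun j => s.getD (s.length - (j + 1) * m.toNat) 0)).sum) * m := by
  intro q
  induction q with
  | zero => intro s r _ _; simp
  | succ n ih =>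
    intro s r hs hq
    have hmn : 1 ≤ m.toNat := by omega
    have hexp : (n + 1) * m.toNat = n * m.toNat + m.toNat := by ring
    have hle : m.toNat ≤ s.length := by omega
    rw [Function.iterate_succ_apply, pv_stepO m hm s r hs hle]
    have hs' : (s.take (s.length - m.toNat)).Pairwise (· ≤ ·) :=
      hs.sublist (List.take_sublist _ _)
    have hlen' : (s.take (s.length - m.toNat)).length = s.length - m.toNat := by
      simp
    have hq' : n * m.toNat ≤ (s.take (s.length - m.toNat)).length := by
      rw [hlen']; omega
    rw [ih (s.take (s.length - m.toNat)) _ hs' hq']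
    have hmap : (List.range n).map
        (fun j => (s.take (s.length - m.toNat)).getD
          ((s.take (s.length - m.toNat)).length - (j + 1) * m.toNat) 0)
        = (List.range n).map (fun j => s.getD (s.length - (j + 2) * m.toNat) 0) := by
      apply List.map_congr_left
      intro j hj
      have hjn : j < n := List.mem_range.1 hj
      have hj1 : (j + 1) * m.toNat ≤ n * m.toNat := Nat.mul_le_mul_right _ (by omega)
      have hj2 : (j + 2) * m.toNat = m.toNat + (j + 1) * m.toNat := by ring
      have hj3 : m.toNat ≤ (j + 1) * m.toNat := Nat.le_mul_of_pos_left _ (by omega)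
      have hnm : n * m.toNat + m.toNat ≤ s.length := by omega
      have hidx : (s.take (s.length - m.toNat)).length - (j + 1) * m.toNat
          = s.length - (j + 2) * m.toNat := by
        rw [hlen']; omega
      rw [hidx]
      have hjlt : s.length - (j + 2) * m.toNat < s.length - m.toNat := by omega
      have hjlt2 : s.length - (j + 2) * m.toNat < s.length := by omega
      simp [List.getD_eq_getElem?_getD, hjlt, List.getElem?_eq_getElem hjlt2]
    rw [hmap, List.range_succ_eq_map, List.map_cons, List.map_map, List.sum_cons]
    have hcomp : (List.range n).map
        ((fun j => s.getD (s.length - (j + 1) * m.toNat) 0) ∘ Nat.succ)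
        = (List.range n).map (fun j => s.getD (s.length - (j + 2) * m.toNat) 0) := by
      apply List.map_congr_left
      intro j _
      simp [Function.comp]
    rw [hcomp]
    simp only [Nat.zero_add, Nat.one_mul]
    ring

theorem pv_div_toNat (n : Nat) (m : Int) (hm : 1 ≤ m) :
    ((n : Int) / m).toNat = n / m.toNat := by
  obtain ⟨m', rfl⟩ : ∃ m' : Nat, (m' : Int) = m :=
    ⟨m.toNat, Int.toNat_of_nonneg (by omega)⟩
  have h2 : ((m' : Int)).toNat = m' := by simp
  have h3 : (0 : Int) ≤ (n : Int) / (m' : Int) :=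
    Int.ediv_nonneg (by positivity) (by positivity)
  rw [h2]
  omega

-- B's range list, explicitly
theorem pv_rangeB (m : Int) (hm : 1 ≤ m) (n : Nat) :
    PySem.List.pyRange ((n : Int) - m) (-1) (-m)
      = (List.range (n / m.toNat)).map (fun k : Nat => (n : Int) - m + -m * (k : Int)) := by
  have hm0 : -m ≠ 0 := by omega
  have hnpos : ¬ (0 < -m) := by omega
  simp only [PySem.List.pyRange, if_neg hm0, hnpos, if_false]
  by_cases hlt : (-1 : Int) < (n : Int) - m
  · rw [if_pos hlt]
    have hnum : ((n : Int) - m - (-1) + -(-m) - 1) = (n : Int) := by ring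
    have hcount : (((n : Int) - m - (-1) + -(-m) - 1) / -(-m)) = (n : Int) / m := by
      rw [hnum, neg_neg]
    rw [hcount, pv_div_toNat n m hm]
  · rw [if_neg hlt]
    have hnm : n < m.toNat := by omega
    rw [Nat.div_eq_of_lt hnm]

theorem pv_foldl_sum (s : List Int) :
    ∀ (l : List Int) (init : Int),
      l.foldl (fun t i => t + PySem.List.pyGetD s i 0) init
        = init + (l.map (fun i => PySem.List.pyGetD s i 0)).sum := by
  intro l
  induction l with
  | nil => intro init; simp
  | cons a t ih => intro init; simp [List.foldl_cons, ih]; ring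

theorem pv_floordiv_nonpos (n : Nat) (m : Int) (hm : m < 0) :
    PySem.Int.floordiv (n : Int) m ≤ 0 := by
  have hdm := PySem.Int.floordiv_mul_add_mod (n : Int) m
  have hb := PySem.Int.mod_neg_bounds (n : Int) hm
  by_contra hcon
  have h1 : 1 ≤ PySem.Int.floordiv (n : Int) m := by omega
  have h2 : PySem.Int.floordiv (n : Int) m * m ≤ 1 * m :=
    mul_le_mul_of_nonpos_right h1 (by omega)
  have h3 : (0 : Int) ≤ (n : Int) := Int.natCast_nonneg n
  omega

-- ===== VERDICT (by name: the statement is the Claim_ definition above) =====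
theorem solution_spec : Claim_equal_solution := by
  intro k m score _ hpre
  unfold Spec_solution
  have hs : (PySem.List.sorted score (fun x => x)).Pairwise (· ≤ ·) :=
    PySem.List.sorted_pairwise score (fun x => x)
  set s := PySem.List.sorted score (fun x => x) with hsdef
  have hsolA : solution k m score =
      ((PySem.List.pyRange 0 (PySem.Int.floordiv (s.length : Int) m) 1).foldl
        (fun st _ => pvStepO m st) (s, 0)).2 := rfl
  have hsolB : solution_alt k m score =
      ((PySem.List.pyRange ((s.length : Int) - m) (-1) (-m)).foldl
        (fun t i => t + PySem.List.pyGetD s i 0) 0) * m := rfl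
  rw [hsolA, hsolB]
  have hm0 : m ≠ 0 := hpre
  by_cases hneg : m < 0
  · -- m < 0 : A's outer range and B's range are both empty, both return 0
    have hA : PySem.List.pyRange 0 (PySem.Int.floordiv (s.length : Int) m) 1 = [] :=
      PySem.List.pyRange_one_eq_nil (pv_floordiv_nonpos s.length m hneg)
    have hB : PySem.List.pyRange ((s.length : Int) - m) (-1) (-m) = [] := by
      have hstep : (0 : Int) < -m := by omega
      rw [PySem.List.pyRange_of_pos _ _ hstep]
      have hno : ¬ ((s.length : Int) - m < -1) := by
        have := Int.natCast_nonneg s.length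
        omega
      rw [if_neg hno]
      simp
    rw [hA, hB]
    simp
  · have hm : 1 ≤ m := by omega
    have hmn : 1 ≤ m.toNat := by omega
    have hmm : (m.toNat : Int) = m := Int.toNat_of_nonneg (by omega)
    -- A's side: iterate pvStepO q times
    rw [pv_foldl_ignore (pvStepO m)]
    have hqlen : (PySem.List.pyRange 0 (PySem.Int.floordiv (s.length : Int) m) 1).length
        = s.length / m.toNat := by
      rw [PySem.List.length_pyRange_one, sub_zero]
      have hfd : PySem.Int.floordiv (s.length : Int) m = (s.length : Int) / m :=
        PySem.Int.floordiv_eq_ediv_of_pos (by omega)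
      rw [hfd, pv_div_toNat s.length m hm]
    have hq : (s.length / m.toNat) * m.toNat ≤ s.length := Nat.div_mul_le_self _ _
    rw [hqlen, pv_iterO m hm (s.length / m.toNat) s 0 hs hq]
    -- B's side
    rw [pv_rangeB m hm s.length, pv_foldl_sum, List.map_map]
    have hmapB : ((List.range (s.length / m.toNat)).map
        ((fun i => PySem.List.pyGetD s i 0) ∘ fun k : Nat => (s.length : Int) - m + -m * (k : Int)))
        = (List.range (s.length / m.toNat)).map
          (fun j => s.getD (s.length - (j + 1) * m.toNat) 0) := by
      apply List.map_congr_left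
      intro j hj
      have hjq : j < s.length / m.toNat := List.mem_range.1 hj
      have hjm : (j + 1) * m.toNat ≤ s.length := by
        calc (j + 1) * m.toNat ≤ (s.length / m.toNat) * m.toNat :=
              Nat.mul_le_mul_right _ (by omega)
          _ ≤ s.length := hq
      have hidx : (s.length : Int) - m + -m * (j : Int)
          = ((s.length - (j + 1) * m.toNat : Nat) : Int) := by
        have hc : ((s.length - (j + 1) * m.toNat : Nat) : Int)
            = (s.length : Int) - ((j : Int) + 1) * (m.toNat : Int) := by
          push_cast [hjm]
          ring
        rw [hc, hmm]
        ring
      simp only [Function.comp_apply]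
      rw [hidx, PySem.List.pyGetD_natCast]
    rw [hmapB]
    ring
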